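-- pv_equiv track=rewrite | github.com/pokochy/JB-Pirate-King | aivdm_gen/guigenerater.py | build_vsd
-- ===== SOURCE A (Python) =====
-- def nmea_checksum(sentence: str) -> str:
--     chk = 0
--     for ch in sentence:
--         chk ^= ord(ch)
--     return f"{chk:02X}"
--
-- def build_vsd(mmsi, vessel_name):
--     name = vessel_name[:20].upper().ljust(20, "@")
--     bits = []
--
--     def push(val, n):
--         for i in range(n - 1, -1, -1):
--             bits.append((val >> i) & 1)
--
--     def push_str(s, chars):
--         for ch in s[:chars]:
--             c = ord(ch)
--             if c >= 64:
--                 c -= 64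
--             push(c, 6)
--
--     push(24, 6)
--     push(0, 2)
--     push(mmsi, 30)
--     push(0, 2)
--     push_str(name, 20)
--     push(0, 8)
--
--     while len(bits) % 6:
--         bits.append(0)
--
--     payload = ""
--     for i in range(0, len(bits), 6):
--         val = 0
--         for b in bits[i:i+6]:
--             val = (val << 1) | b
--         char_code = val + 48
--         if char_code > 87:
--             char_code += 8
--         payload += chr(char_code)
--
--     sentence_body = f"AIVDM,1,1,,A,{payload},0"
--     chk = nmea_checksum(sentence_body)
--     return f"!{sentence_body}*{chk}\r\n"
-- ===== SOURCE B (Python) =====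
-- def build_vsd(mmsi, vessel_name):
--     # integer accumulator instead of a bit list: multiply-accumulate each field,
--     # then peel 6-bit symbols off the low end and reverse
--     name = vessel_name[:20].upper().ljust(20, "@")
--     acc = 24                      # message type, 6 bits
--     acc = acc * 4                 # 2 spare bits
--     acc = acc * (2 ** 30) + mmsi % (2 ** 30)
--     acc = acc * 4                 # 2 spare bits
--     for ch in name:
--         acc = acc * 64 + ord(ch) % 64
--     acc = acc * 256               # 8 trailing zero bits; total 168 = 28 * 6
--     chars = []
--     for _ in range(28):
--         v = acc % 64
--         chars.append(chr(v + 48 if v < 40 else v + 56))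
--         acc //= 64
--     payload = "".join(reversed(chars))
--     body = "AIVDM,1,1,,A," + payload + ",0"
--     chk = 0
--     for ch in body:
--         chk ^= ord(ch)
--     return "!%s*%02X\r\n" % (body, chk)
-- ===== Notes on version B (the rewrite author's own statement) =====
-- stated objective: alternative
-- what changed: Replaces the per-bit list (push loops, padding loop, 6-bit regrouping with inner shift-or folds) by a single integer accumulator built with multiply-accumulate per field, from which the 28 six-bit payload symbols are peeled off the low end by divmod and reversed.
import Mathlib
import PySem

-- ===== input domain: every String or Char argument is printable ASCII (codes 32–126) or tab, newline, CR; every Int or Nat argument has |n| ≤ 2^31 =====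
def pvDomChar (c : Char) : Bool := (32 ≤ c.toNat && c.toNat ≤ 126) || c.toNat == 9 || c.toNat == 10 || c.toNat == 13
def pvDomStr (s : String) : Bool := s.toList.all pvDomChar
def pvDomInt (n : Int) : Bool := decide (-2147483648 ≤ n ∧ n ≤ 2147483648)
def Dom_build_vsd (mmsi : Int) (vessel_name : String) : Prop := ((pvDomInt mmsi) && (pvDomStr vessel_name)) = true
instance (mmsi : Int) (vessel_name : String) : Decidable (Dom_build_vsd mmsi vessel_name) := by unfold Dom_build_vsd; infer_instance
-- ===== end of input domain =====

-- B replaces A's per-bit list with a single integer accumulator (multiply-accumulate the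
-- fields, then peel the 28 six-bit symbols off the low end and reverse): simpler/alternative.

-- shared formatting helper: f"{n:02X}" — exact for 0 ≤ n < 256 (the checksum is always in 0..127 here)
def pvHexDigit (d : Int) : Char :=
  if d < 10 then Char.ofNat (48 + d.toNat) else Char.ofNat (55 + d.toNat)
def pvHex2 (n : Int) : List Char := [pvHexDigit (n / 16), pvHexDigit (n % 16)]

-- ===== PORT A =====
-- A's nmea_checksum (xor of the code points, two uppercase hex digits)
def pvChecksumA (s : List Char) : Int :=
  s.foldl (fun chk c => PySem.Int.bxor chk ((c.toNat : Int))) 0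

-- A's push: for i in range(n-1, -1, -1): bits.append((val >> i) & 1)   (i ≥ 0, so i.toNat is exact)
def pvPush (bits : List Int) (val : Int) (n : Int) : List Int :=
  (PySem.List.pyRange (n - 1) (-1) (-1)).foldl
    (fun b i => b ++ [PySem.Int.band (val >>> i.toNat) 1]) bits

-- A's push_str
def pvPushStr (bits : List Int) (s : List Char) (chars : Int) : List Int :=
  (PySem.List.slice s none (some chars)).foldl
    (fun b ch =>
      let c : Int := (ch.toNat : Int)
      let c := if 64 ≤ c then c - 64 else c
      pvPush b c 6) bits

-- A's padding loop: while len(bits) % 6: bits.append(0)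
def pvPad (bits : List Int) : List Int :=
  if bits.length % 6 = 0 then bits else pvPad (bits ++ [0])
termination_by (6 - bits.length % 6) % 6
decreasing_by simp; omega

def build_vsd (mmsi : Int) (vessel_name : String) : String :=
  -- name = vessel_name[:20].upper().ljust(20, "@")  (ljust: pad on the right with '@' to length 20)
  let cs := PySem.Chars.upper (PySem.List.slice vessel_name.toList none (some 20))
  let name := cs ++ List.replicate (20 - cs.length) '@'
  let bits : List Int := []
  let bits := pvPush bits 24 6
  let bits := pvPush bits 0 2
  let bits := pvPush bits mmsi 30
  let bits := pvPush bits 0 2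
  let bits := pvPushStr bits name 20
  let bits := pvPush bits 0 8
  let bits := pvPad bits
  let payload := (PySem.List.pyRange 0 (bits.length : Int) 6).foldl
    (fun p i =>
      let val := (PySem.List.slice bits (some i) (some (i + 6))).foldl
        (fun v b => PySem.Int.bor (v <<< (1:Nat)) b) 0
      let cc := val + 48
      let cc := if 87 < cc then cc + 8 else cc
      p ++ [Char.ofNat cc.toNat]) ([] : List Char)
  let body := "AIVDM,1,1,,A,".toList ++ payload ++ ",0".toList
  let chk := pvChecksumA body
  String.ofList ('!' :: (body ++ '*' :: pvHex2 chk ++ ['\r', '\n']))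

-- ===== PORT B =====
def build_vsd_alt (mmsi : Int) (vessel_name : String) : String :=
  let cs := PySem.Chars.upper (PySem.List.slice vessel_name.toList none (some 20))
  let name := cs ++ List.replicate (20 - cs.length) '@'
  let acc : Int := 24
  let acc := acc * 4
  let acc := acc * 2 ^ 30 + PySem.Int.mod mmsi (2 ^ 30)
  let acc := acc * 4
  let acc := name.foldl (fun a ch => a * 64 + PySem.Int.mod ((ch.toNat : Int)) 64) acc
  let acc := acc * 256
  let st := (List.range 28).foldl
    (fun (st : List Char × Int) _ =>
      let v := PySem.Int.mod st.2 64
      (st.1 ++ [Char.ofNat (if v < 40 then v + 48 else v + 56).toNat],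
       PySem.Int.floordiv st.2 64)) (([] : List Char), acc)
  let payload := st.1.reverse
  let body := "AIVDM,1,1,,A,".toList ++ payload ++ ",0".toList
  let chk := body.foldl (fun chk c => PySem.Int.bxor chk ((c.toNat : Int))) 0
  String.ofList ('!' :: (body ++ '*' :: pvHex2 chk ++ ['\r', '\n']))

-- ===== PRECONDITION & SPEC =====
def Spec_build_vsd (mmsi : Int) (vessel_name : String) (out : String) : Prop := out = build_vsd_alt mmsi vessel_name
instance (mmsi : Int) (vessel_name : String) (out : String) : Decidable (Spec_build_vsd mmsi vessel_name out) := by unfold Spec_build_vsd; infer_instance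

-- ===== CLAIM (what is proved, stated in full; the proofs are below) =====
def Claim_equal_build_vsd : Prop := ∀ (mmsi : Int) (vessel_name : String), Dom_build_vsd mmsi vessel_name → Spec_build_vsd mmsi vessel_name (build_vsd mmsi vessel_name)

-- ===== LEMMAS AND PROOFS =====

def pvBit (x : Int) (i : Nat) : Int := (x / 2 ^ i) % 2
def pvBits (x : Int) (n : Nat) : List Int := (List.range n).map (fun k => pvBit x (n - 1 - k))

theorem pvBits_length (x : Int) (n : Nat) : (pvBits x n).length = n := by
  simp [pvBits]

theorem pvDivModCongr (x y : Int) (m : Nat) (c : Int)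
    (h : x % (2 ^ m * c) = y % (2 ^ m * c)) : (x / 2 ^ m) % c = (y / 2 ^ m) % c := by
  have hp : (2:Int) ^ m ≠ 0 := by positivity
  have key : ∀ z : Int, z % (2 ^ m * c) = y % (2 ^ m * c) → (z / 2 ^ m) % c = ((y % (2 ^ m * c)) / 2 ^ m) % c := by
    intro z hz
    have hd : z = y % (2 ^ m * c) + (z / (2 ^ m * c) * c) * 2 ^ m := by
      rw [← hz]
      have := Int.mul_ediv_add_emod z (2 ^ m * c)
      ring_nf
      ring_nf at this
      linarith
    rw [hd, Int.add_mul_ediv_right _ _ hp, Int.add_mul_emod_self_right]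
  rw [key x h, key y rfl]

theorem pvBit_congr (x y : Int) (n i : Nat) (hi : i < n)
    (h : x % 2 ^ n = y % 2 ^ n) : pvBit x i = pvBit y i := by
  have hdvd : ((2:Int) ^ i * 2) ∣ 2 ^ n := by
    have : (2:Int) ^ i * 2 = 2 ^ (i + 1) := by rw [pow_succ]
    rw [this]
    exact pow_dvd_pow 2 (by omega)
  unfold pvBit
  exact pvDivModCongr x y i 2 (by
    rw [← Int.emod_emod_of_dvd x hdvd, ← Int.emod_emod_of_dvd y hdvd, h])

theorem pvBits_congr (x y : Int) (n : Nat) (h : x % 2 ^ n = y % 2 ^ n) :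
    pvBits x n = pvBits y n := by
  unfold pvBits
  apply List.map_congr_left
  intro k hk
  simp only [List.mem_range] at hk
  exact pvBit_congr x y n _ (by omega) h

theorem pvBit_high (a r : Int) (n j : Nat) (hr0 : 0 ≤ r) (hr : r < 2 ^ n) :
    pvBit (a * 2 ^ n + r) (j + n) = pvBit a j := by
  unfold pvBit
  have h1 : (2:Int) ^ (j + n) = 2 ^ n * 2 ^ j := by rw [pow_add]; ring
  have h2 : (a * 2 ^ n + r) / 2 ^ (j + n) = (a * 2 ^ n + r) / 2 ^ n / 2 ^ j := by
    rw [h1, ← Int.ediv_ediv_eq_ediv_mul (by positivity)]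
  have h3 : (a * 2 ^ n + r) / 2 ^ n = a := by
    rw [add_comm, Int.add_mul_ediv_right _ _ (by positivity : (2:Int)^n ≠ 0) ,
      Int.ediv_eq_zero_of_lt hr0 hr, zero_add]
  rw [h2, h3]

theorem pvBit_low (a r : Int) (n j : Nat) (hj : j < n) :
    pvBit (a * 2 ^ n + r) j = pvBit r j := by
  apply pvBit_congr _ _ n _ hj
  rw [add_comm]
  exact Int.add_mul_emod_self_right r a (2 ^ n)

theorem pvBits_split (a r : Int) (L n : Nat) (hr0 : 0 ≤ r) (hr : r < 2 ^ n) :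
    pvBits (a * 2 ^ n + r) (L + n) = pvBits a L ++ pvBits r n := by
  unfold pvBits
  rw [List.range_add, List.map_append, List.map_map]
  congr 1
  · apply List.map_congr_left
    intro k hk
    simp only [List.mem_range] at hk
    have h1 : L + n - 1 - k = (L - 1 - k) + n := by omega
    rw [h1, pvBit_high a r n _ hr0 hr]
  · apply List.map_congr_left
    intro k hk
    simp only [List.mem_range] at hk
    have h1 : L + n - 1 - (L + k) = n - 1 - k := by omega
    simp only [Function.comp]
    rw [h1, pvBit_low a r n _ (by omega)]


theorem pvPush_eq (bits : List Int) (val : Int) (n : Nat) :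
    pvPush bits val (n : Int) = bits ++ pvBits val n := by
  unfold pvPush
  rw [PySem.List.pyRange_neg_one, PySem.List.foldl_append_singleton_eq_map, List.map_map]
  congr 1
  unfold pvBits
  have hn : ((n : Int) - 1 - -1).toNat = n := by omega
  rw [hn]
  apply List.map_congr_left
  intro k hk
  simp only [List.mem_range] at hk
  simp only [Function.comp]
  have h1 : ((n : Int) - 1 - (k : Int)).toNat = n - 1 - k := by omega
  rw [h1, Int.shiftRight_natCast_right, Int.shiftRight_eq_div_pow, PySem.Int.band_one,
    PySem.Int.mod_eq_emod_of_pos (by norm_num)]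
  unfold pvBit
  norm_cast

theorem pvBits_succ (x : Int) (n : Nat) :
    pvBits x (n + 1) = pvBit x n :: pvBits x n := by
  unfold pvBits
  rw [List.range_succ_eq_map, List.map_cons, List.map_map]
  norm_num
  intro a ha
  congr 1
  omega

theorem lor_two_mul_one (v : Nat) : 2 * v ||| 1 = 2 * v + 1 := by
  apply Nat.eq_of_testBit_eq
  intro i
  rw [Nat.testBit_or]
  cases i with
  | zero => simp [Nat.testBit_zero]
  | succ j =>
    simp only [Nat.testBit_succ]
    have h1 : 2 * v / 2 = v := by omega
    have h2 : (2 * v + 1) / 2 = v := by omega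
    have h3 : (1 : Nat) / 2 = 0 := by norm_num
    rw [h1, h2, h3]
    simp

theorem pvBor_bit (v b : Int) (hv : 0 ≤ v) (hb : b = 0 ∨ b = 1) :
    PySem.Int.bor (v <<< (1 : Nat)) b = 2 * v + b := by
  rw [Int.shiftLeft_eq]
  rcases hb with hb | hb <;> subst hb
  · simp
    ring
  · rw [PySem.Int.bor_of_nonneg (by positivity) (by norm_num)]
    have h1 : (v * 2 ^ 1).toNat = 2 * v.toNat := by omega
    rw [h1, Int.toNat_one, lor_two_mul_one]
    omega

theorem pvModSplit (x : Int) (n : Nat) :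
    x % 2 ^ (n + 1) = (x / 2 ^ n) % 2 * 2 ^ n + x % 2 ^ n := by
  have hP : (0:Int) < 2 ^ n := by positivity
  have h1 : x = 2 ^ n * (x / 2 ^ n) + x % 2 ^ n := (Int.mul_ediv_add_emod x (2 ^ n)).symm
  have h2 : x / 2 ^ n = 2 * (x / 2 ^ n / 2) + (x / 2 ^ n) % 2 :=
    (Int.mul_ediv_add_emod (x / 2 ^ n) 2).symm
  have hx : x = ((x / 2 ^ n) % 2 * 2 ^ n + x % 2 ^ n) + (x / 2 ^ n / 2) * 2 ^ (n + 1) := by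
    calc x = 2 ^ n * (x / 2 ^ n) + x % 2 ^ n := h1
    _ = 2 ^ n * (2 * (x / 2 ^ n / 2) + (x / 2 ^ n) % 2) + x % 2 ^ n := by rw [← h2]
    _ = ((x / 2 ^ n) % 2 * 2 ^ n + x % 2 ^ n) + (x / 2 ^ n / 2) * 2 ^ (n + 1) := by
        rw [pow_succ]; ring
  have hb : (x / 2 ^ n) % 2 = 0 ∨ (x / 2 ^ n) % 2 = 1 := Int.emod_two_eq_zero_or_one _
  have hlo : 0 ≤ x % 2 ^ n := Int.emod_nonneg _ (by positivity)
  have hhi : x % 2 ^ n < 2 ^ n := Int.emod_lt_of_pos _ hP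
  conv_lhs => rw [hx]
  rw [Int.add_mul_emod_self_right]
  apply Int.emod_eq_of_lt
  · rcases hb with h | h <;> rw [h] <;> nlinarith
  · rcases hb with h | h <;> rw [h] <;> [skip; skip] <;> rw [pow_succ] <;> nlinarith

theorem pvFold_bits (n : Nat) (x v0 : Int) (hv : 0 ≤ v0) :
    (pvBits x n).foldl (fun v b => PySem.Int.bor (v <<< (1 : Nat)) b) v0
      = v0 * 2 ^ n + x % 2 ^ n := by
  induction n generalizing v0 with
  | zero => simp [pvBits]
  | succ n ih =>
    rw [pvBits_succ, List.foldl_cons,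
      pvBor_bit v0 (pvBit x n) hv (Int.emod_two_eq_zero_or_one _),
      ih _ (by have := Int.emod_two_eq_zero_or_one (x / 2 ^ n); unfold pvBit; omega),
      pvModSplit]
    unfold pvBit
    ring

-- A's push_str fold over the name = B's multiply-accumulate fold
theorem pvName_fold (s : List Char) (acc : Int) (L : Nat) :
    s.foldl (fun b ch =>
        let c : Int := (ch.toNat : Int)
        let c := if 64 ≤ c then c - 64 else c
        pvPush b c 6) (pvBits acc L)
      = pvBits (s.foldl (fun a ch => a * 64 + PySem.Int.mod ((ch.toNat : Int)) 64) acc)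
          (L + 6 * s.length) := by
  induction s generalizing acc L with
  | nil => simp
  | cons ch s ih =>
    simp only [List.foldl_cons]
    have hc : (if 64 ≤ (ch.toNat : Int) then (ch.toNat : Int) - 64 else (ch.toNat : Int)) % 2 ^ 6
        = ((ch.toNat : Int) % 64) % 2 ^ 6 := by
      norm_num
      split <;> omega
    have hr0 : (0:Int) ≤ (ch.toNat : Int) % 64 := Int.emod_nonneg _ (by norm_num)
    have hr1 : (ch.toNat : Int) % 64 < 2 ^ 6 := by
      norm_num
      exact Int.emod_lt_of_pos _ (by norm_num)
    have hpush : pvPush (pvBits acc L)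
        (if 64 ≤ (ch.toNat : Int) then (ch.toNat : Int) - 64 else (ch.toNat : Int)) 6
        = pvBits (acc * 64 + PySem.Int.mod ((ch.toNat : Int)) 64) (L + 6) := by
      have h6 : ((6:Nat):Int) = (6:Int) := by norm_num
      rw [← h6, pvPush_eq, pvBits_congr _ ((ch.toNat : Int) % 64) 6 hc,
        ← pvBits_split acc ((ch.toNat : Int) % 64) L 6 hr0 hr1,
        PySem.Int.mod_eq_emod_of_pos (by norm_num : (0:Int) < 64)]
      norm_num
    rw [hpush, ih]
    congr 1
    simp
    omega

-- B's symbol loop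
theorem pvSymLoop (m : Nat) (pre : List Char) (acc : Int) :
    (List.range m).foldl
      (fun (st : List Char × Int) _ =>
        let v := PySem.Int.mod st.2 64
        (st.1 ++ [Char.ofNat (if v < 40 then v + 48 else v + 56).toNat],
         PySem.Int.floordiv st.2 64)) (pre, acc)
      = (pre ++ (List.range m).map (fun t =>
            Char.ofNat (if (acc / 64 ^ t) % 64 < 40 then (acc / 64 ^ t) % 64 + 48
              else (acc / 64 ^ t) % 64 + 56).toNat),
         acc / 64 ^ m) := by
  induction m generalizing pre acc with
  | zero => simp
  | succ m ih =>
    rw [List.range_succ, List.foldl_append, ih]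
    simp only [List.foldl_cons, List.foldl_nil]
    congr 1
    · rw [List.map_append, ← List.append_assoc]
      congr 2
      simp
    · rw [PySem.Int.floordiv_eq_ediv_of_pos (by norm_num),
        Int.ediv_ediv_eq_ediv_mul (by positivity), ← pow_succ]

-- A's payload loop over a bit list reads the 6-bit symbols MSB-first
theorem pvPayloadA (g : Nat) (pre : List Int) (p0 : List Char) (acc : Int) (bs : List Int)
    (hbs : bs = pre ++ pvBits acc (6 * g)) :
    ((List.range g).map (fun k : Nat => (pre.length : Int) + 6 * (k : Int))).foldl
      (fun p i =>
        let val := (PySem.List.slice bs (some i) (some (i + 6))).foldl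
          (fun v b => PySem.Int.bor (v <<< (1 : Nat)) b) 0
        let cc := val + 48
        let cc := if 87 < cc then cc + 8 else cc
        p ++ [Char.ofNat cc.toNat]) p0
    = p0 ++ (List.range g).map (fun t =>
        let v := acc / 2 ^ (6 * (g - 1 - t)) % 64
        Char.ofNat (if 87 < v + 48 then v + 48 + 8 else v + 48).toNat) := by
  induction g generalizing pre p0 acc bs with
  | zero => simp
  | succ g ih =>
    have hd : acc / 2 ^ (6 * g) * 2 ^ (6 * g) + acc % 2 ^ (6 * g) = acc := by
      have := Int.mul_ediv_add_emod acc (2 ^ (6 * g))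
      linarith
    have hr0 : (0:Int) ≤ acc % 2 ^ (6 * g) := Int.emod_nonneg _ (by positivity)
    have hr1 : acc % 2 ^ (6 * g) < 2 ^ (6 * g) := Int.emod_lt_of_pos _ (by positivity)
    have hsplit : pvBits acc (6 * (g + 1))
        = pvBits (acc / 2 ^ (6 * g)) 6 ++ pvBits (acc % 2 ^ (6 * g)) (6 * g) := by
      have h1 : 6 * (g + 1) = 6 + 6 * g := by omega
      rw [h1, ← hd, pvBits_split _ _ 6 (6 * g) hr0 hr1]
      rw [hd]
    rw [List.range_succ_eq_map, List.map_cons, List.foldl_cons]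
    simp only [Nat.cast_zero, mul_zero, add_zero]
    -- first group value
    have hb : (pre.length : Int) + 6 = ((pre.length + 6 : Nat) : Int) := by
      push_cast; ring
    have hslice : PySem.List.slice bs (some ((pre.length : Int)))
        (some ((pre.length : Int) + 6))
        = pvBits (acc / 2 ^ (6 * g)) 6 := by
      rw [hb, PySem.List.slice_natCast, hbs, hsplit, List.drop_left]
      have h2 : pre.length + 6 - pre.length = 6 := by omega
      rw [h2, List.take_left' (pvBits_length _ 6)]
    have hval : (pvBits (acc / 2 ^ (6 * g)) 6).foldl
        (fun v b => PySem.Int.bor (v <<< (1 : Nat)) b) 0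
        = acc / 2 ^ (6 * g) % 64 := by
      rw [pvFold_bits 6 _ 0 le_rfl]
      norm_num
    rw [hslice, hval]
    -- tail indices
    have htl : (List.map Nat.succ (List.range g)).map (fun k : Nat => (pre.length : Int) + 6 * (k : Int))
        = (List.range g).map (fun k : Nat => (((pre ++ pvBits (acc / 2 ^ (6 * g)) 6).length : Nat) : Int) + 6 * (k : Int)) := by
      rw [List.map_map]
      apply List.map_congr_left
      intro k hk
      simp only [Function.comp_apply, Nat.succ_eq_add_one, List.length_append, pvBits_length]
      push_cast
      omega
    rw [htl, ih (pre ++ pvBits (acc / 2 ^ (6 * g)) 6) _ (acc % 2 ^ (6 * g)) bs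
      (by rw [hbs, hsplit, List.append_assoc])]
    -- reassemble the output list
    rw [List.append_assoc]
    congr 1
    rw [List.map_cons, List.singleton_append, List.map_map]
    congr 1
    norm_num
    intro t ht
    have hm : g - (t + 1) = g - 1 - t := by omega
    rw [hm]
    have hdvd : ((2:Int) ^ (6 * (g - 1 - t)) * 64) ∣ 2 ^ (6 * g) := by
      have h64 : ((2:Int) ^ (6 * (g - 1 - t)) * 64) = 2 ^ (6 * (g - 1 - t) + 6) := by
        rw [pow_add]; norm_num
      rw [h64]
      exact pow_dvd_pow 2 (by omega)
    have hcong : acc / 2 ^ (6 * (g - 1 - t)) % 64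
        = (acc % 2 ^ (6 * g)) / 2 ^ (6 * (g - 1 - t)) % 64 :=
      pvDivModCongr _ _ _ 64 (Int.emod_emod_of_dvd acc hdvd).symm
    rw [hcong]

theorem pvRevMapRange {α : Type} (n : Nat) (f : Nat → α) :
    ((List.range n).map f).reverse = (List.range n).map (fun i => f (n - 1 - i)) := by
  apply List.ext_getElem
  · simp
  · intro i h1 h2
    simp only [List.getElem_reverse, List.getElem_map, List.getElem_range,
      List.length_map, List.length_range] at *


-- zeta-expanded restatements (the goal after `simp only` has the lets substituted)
theorem pvName_fold' (s : List Char) (acc : Int) (L : Nat) :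
    s.foldl (fun b ch =>
        pvPush b (if 64 ≤ (ch.toNat : Int) then (ch.toNat : Int) - 64 else (ch.toNat : Int)) 6)
      (pvBits acc L)
      = pvBits (s.foldl (fun a ch => a * 64 + PySem.Int.mod ((ch.toNat : Int)) 64) acc)
          (L + 6 * s.length) := pvName_fold s acc L

theorem pvPayloadA' (g : Nat) (pre : List Int) (p0 : List Char) (acc : Int) (bs : List Int)
    (hbs : bs = pre ++ pvBits acc (6 * g)) :
    ((List.range g).map (fun k : Nat => (pre.length : Int) + 6 * (k : Int))).foldl
      (fun p i => p ++ [Char.ofNat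
        (if 87 < (PySem.List.slice bs (some i) (some (i + 6))).foldl
              (fun v b => PySem.Int.bor (v <<< (1 : Nat)) b) 0 + 48
         then (PySem.List.slice bs (some i) (some (i + 6))).foldl
              (fun v b => PySem.Int.bor (v <<< (1 : Nat)) b) 0 + 48 + 8
         else (PySem.List.slice bs (some i) (some (i + 6))).foldl
              (fun v b => PySem.Int.bor (v <<< (1 : Nat)) b) 0 + 48).toNat]) p0
    = p0 ++ (List.range g).map (fun t => Char.ofNat
        (if 87 < acc / 2 ^ (6 * (g - 1 - t)) % 64 + 48
         then acc / 2 ^ (6 * (g - 1 - t)) % 64 + 48 + 8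
         else acc / 2 ^ (6 * (g - 1 - t)) % 64 + 48).toNat) := pvPayloadA g pre p0 acc bs hbs

theorem pvSymLoop' (m : Nat) (pre : List Char) (acc : Int) :
    (List.range m).foldl
      (fun (st : List Char × Int) _ =>
        (st.1 ++ [Char.ofNat (if PySem.Int.mod st.2 64 < 40 then PySem.Int.mod st.2 64 + 48
            else PySem.Int.mod st.2 64 + 56).toNat],
         PySem.Int.floordiv st.2 64)) (pre, acc)
      = (pre ++ (List.range m).map (fun t =>
            Char.ofNat (if (acc / 64 ^ t) % 64 < 40 then (acc / 64 ^ t) % 64 + 48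
              else (acc / 64 ^ t) % 64 + 56).toNat),
         acc / 64 ^ m) := pvSymLoop m pre acc


-- ===== VERDICT (by name: the statement is the Claim_ definition above) =====
set_option maxHeartbeats 2000000 in
theorem build_vsd_spec : Claim_equal_build_vsd := by
  intro mmsi vessel_name _
  unfold Spec_build_vsd
  simp only [build_vsd, build_vsd_alt]
  set nm := PySem.Chars.upper (PySem.List.slice vessel_name.toList none (some 20)) with hnm
  set name : List Char := nm ++ List.replicate (20 - nm.length) '@' with hname
  have hnml : nm.length ≤ 20 := by
    rw [hnm]
    simp only [PySem.Chars.upper, List.length_map]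
    have h := PySem.List.slice_to vessel_name.toList (b := 20) (by norm_num)
    rw [h]
    simp
  have hlen : name.length = 20 := by
    rw [hname]
    simp only [List.length_append, List.length_replicate]
    omega
  set a2 : Int := 24 * 4 * 2 ^ 30 + PySem.Int.mod mmsi (2 ^ 30) with ha2
  set A5 : Int := name.foldl (fun a ch => a * 64 + PySem.Int.mod ((ch.toNat : Int)) 64) (a2 * 4) with hA5
  have hmm0 : 0 ≤ PySem.Int.mod mmsi (2 ^ 30) := by
    rw [PySem.Int.mod_eq_emod_of_pos (by positivity)]
    exact Int.emod_nonneg _ (by positivity)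
  have hmm1 : PySem.Int.mod mmsi (2 ^ 30) < 2 ^ 30 := by
    rw [PySem.Int.mod_eq_emod_of_pos (by positivity)]
    exact Int.emod_lt_of_pos _ (by positivity)
  have s1 : pvPush [] 24 6 = pvBits 24 6 := by
    have h := pvPush_eq [] 24 6
    norm_num at h
    exact h
  have s2 : pvPush (pvBits 24 6) 0 2 = pvBits (24 * 4) 8 := by
    have h := pvPush_eq (pvBits 24 6) 0 2
    norm_num at h
    rw [h, ← pvBits_split 24 0 6 2 le_rfl (by norm_num)]
    norm_num
  have s3 : pvPush (pvBits (24 * 4) 8) mmsi 30 = pvBits a2 38 := by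
    have h := pvPush_eq (pvBits (24 * 4) 8) mmsi 30
    simp only [Nat.cast_ofNat] at h
    have hc : mmsi % 2 ^ 30 = (PySem.Int.mod mmsi (2 ^ 30)) % 2 ^ 30 := by
      rw [PySem.Int.mod_eq_emod_of_pos (by positivity), Int.emod_emod_of_dvd _ dvd_rfl]
    rw [h, pvBits_congr mmsi (PySem.Int.mod mmsi (2 ^ 30)) 30 hc,
      ← pvBits_split (24 * 4) _ 8 30 hmm0 hmm1, ha2]
  have s4 : pvPush (pvBits a2 38) 0 2 = pvBits (a2 * 4) 40 := by
    have h := pvPush_eq (pvBits a2 38) 0 2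
    norm_num at h
    rw [h, ← pvBits_split a2 0 38 2 le_rfl (by norm_num)]
    norm_num
  have s5 : pvPushStr (pvBits (a2 * 4) 40) name 20 = pvBits A5 160 := by
    simp only [pvPushStr]
    have hsl : PySem.List.slice name none (some 20) = name := by
      have h := PySem.List.slice_to name (b := 20) (by norm_num)
      rw [h]
      have h20 : (20 : Int).toNat = 20 := rfl
      rw [h20]
      exact List.take_of_length_le (by omega)
    rw [hsl, pvName_fold' name (a2 * 4) 40, hlen, hA5]
  have s6 : pvPush (pvBits A5 160) 0 8 = pvBits (A5 * 256) 168 := by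
    have h := pvPush_eq (pvBits A5 160) 0 8
    norm_num at h
    rw [h, ← pvBits_split A5 0 160 8 le_rfl (by norm_num)]
    norm_num
  have hpad : pvPad (pvBits (A5 * 256) 168) = pvBits (A5 * 256) 168 := by
    rw [pvPad]
    simp [pvBits_length]
  have hbits : pvPad (pvPush (pvPushStr (pvPush (pvPush (pvPush (pvPush [] 24 6) 0 2) mmsi 30) 0 2)
      name 20) 0 8) = pvBits (A5 * 256) 168 := by
    rw [s1, s2, s3, s4, s5, s6, hpad]
  rw [hbits]
  simp only [pvBits_length]
  have hpr : PySem.List.pyRange 0 168 6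
      = (List.range 28).map (fun k : Nat => ((([] : List Int).length : Int)) + 6 * (k : Int)) := by
    rw [PySem.List.pyRange_of_pos 0 168 (by norm_num)]
    norm_num
    rfl
  have hcast : ((168 : Nat) : Int) = (168 : Int) := by norm_num
  rw [hcast, hpr, pvPayloadA' 28 [] [] (A5 * 256) _ (by norm_num)]
  rw [pvSymLoop' 28 [] (A5 * 256)]
  simp only [List.nil_append]
  rw [pvRevMapRange 28 _]
  have hpay : (List.range 28).map (fun t => Char.ofNat
        (if 87 < A5 * 256 / 2 ^ (6 * (28 - 1 - t)) % 64 + 48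
         then A5 * 256 / 2 ^ (6 * (28 - 1 - t)) % 64 + 48 + 8
         else A5 * 256 / 2 ^ (6 * (28 - 1 - t)) % 64 + 48).toNat)
      = (List.range 28).map (fun i => Char.ofNat
          (if (A5 * 256 / 64 ^ (28 - 1 - i)) % 64 < 40 then (A5 * 256 / 64 ^ (28 - 1 - i)) % 64 + 48
            else (A5 * 256 / 64 ^ (28 - 1 - i)) % 64 + 56).toNat) := by
    apply List.map_congr_left
    intro t ht
    have h64 : ((64 : Int) ^ (28 - 1 - t)) = 2 ^ (6 * (28 - 1 - t)) := by
      rw [show (64 : Int) = 2 ^ 6 by norm_num, ← pow_mul]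
    rw [h64]
    have hv : ∀ v : Int, (if 87 < v + 48 then v + 48 + 8 else v + 48)
        = (if v < 40 then v + 48 else v + 56) := by
      intro v
      split_ifs <;> omega
    rw [hv]
  rw [hpay]
  simp only [pvChecksumA]
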